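-- pv_equiv track=rewrite | github.com/Isaac-Gibbons-GEARS/Python-Math-Functions | sum of-sqare math function.py | sumrangesqr
-- ===== SOURCE A (Python) =====
-- def sumrangesqr(xmin, xmax, base, added):
--     """ The components of the sum-of math function, but specifically tailored for sum of functions when x is an exponent. Example: 2^x + 3. Xmin is the
--     starting value, xmax is the maximum x value, base is the number x raises,
--     and added is any value added to x. In the previous example, 2 = the base and 3 equals added. Unfortunately python doesn't allow
--     sum of figures, so that, the best example I can give in the code. If there is no multiplier for x, type 1 for base,
--     and if there is no number that is added to x, type 0 for added."""
--     total = 0  # Set up the total variable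
--     numberlist = list(range(xmin, xmax + 1))  # Calculates the list of values for x
--     times_to_repeat = (xmax-xmin)+1 #calculates how many times to run the for loop.
--     for x in range(times_to_repeat):
--         number = numberlist[x] #gets each value of x.
--         result = (base**number)+added #calculates the result with the x value.
--         total = total + result #collects the results.
--     return total
-- ===== SOURCE B (Python) =====
-- def sumrangesqr(xmin, xmax, base, added):
--     """Closed-form geometric series (fast exponentiation) instead of the O(n) loop."""
--     n = xmax - xmin + 1
--     if n <= 0:
--         return 0
--     if base == 1:
--         geo = n
--     else:
--         geo = (base ** (xmax + 1) - base ** xmin) // (base - 1)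
--     return geo + added * n
-- ===== Notes on version B (the rewrite author's own statement) =====
-- stated objective: faster
-- what changed: Replaces the element-by-element loop over range(xmin, xmax+1) with the closed-form geometric-series formula (base**(xmax+1)-base**xmin)//(base-1) + added*n, special-casing base==1.
-- outside the precondition, e.g. on sumrangesqr(-2, 1, 2, 0): A returns 3.75, B returns 3.0
import Mathlib
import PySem

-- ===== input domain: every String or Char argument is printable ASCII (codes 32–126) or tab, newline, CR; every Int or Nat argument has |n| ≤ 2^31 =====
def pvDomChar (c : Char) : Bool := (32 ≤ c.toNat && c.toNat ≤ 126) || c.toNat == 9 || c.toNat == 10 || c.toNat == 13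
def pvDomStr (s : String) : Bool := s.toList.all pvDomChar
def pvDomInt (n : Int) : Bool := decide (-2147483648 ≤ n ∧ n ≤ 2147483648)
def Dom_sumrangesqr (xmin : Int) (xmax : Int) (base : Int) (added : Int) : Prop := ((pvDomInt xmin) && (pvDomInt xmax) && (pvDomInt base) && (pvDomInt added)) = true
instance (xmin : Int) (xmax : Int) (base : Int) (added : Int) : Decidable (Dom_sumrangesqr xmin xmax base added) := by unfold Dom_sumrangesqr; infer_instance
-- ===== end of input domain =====

-- B replaces A's element-by-element loop with the closed-form geometric series; equivalence on Pre_ (nonnegative exponents or an empty range).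

-- ===== PORT A =====
-- Exponentiation by squaring: the semantics of Python's built-in `**` on Nat exponents
-- (Python's int pow is itself binary; a unary pow would not terminate in time on admitted inputs).
def powBin (b : Int) (e : Nat) : Int :=
  if h : e = 0 then 1
  else
    let r := powBin (b * b) (e / 2)
    if e % 2 = 1 then b * r else r
termination_by e
decreasing_by exact Nat.div_lt_self (Nat.pos_of_ne_zero h) one_lt_two

-- Python's `base ** e` for an Int; exact for 0 <= e (Pre_ excludes negative exponents,
-- where Python produces a float or raises ZeroDivisionError).
def pyPow (b : Int) (e : Int) : Int := if 0 ≤ e then powBin b e.toNat else 0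

def sumrangesqr (xmin : Int) (xmax : Int) (base : Int) (added : Int) : Int :=
  let numberlist := PySem.List.pyRange xmin (xmax + 1) 1
  let times_to_repeat := (xmax - xmin) + 1
  (PySem.List.pyRange 0 times_to_repeat 1).foldl
    (fun total x =>
      let number := PySem.List.pyGetD numberlist x 0  -- numberlist[x]; x is always in range here
      let result := pyPow base number + added
      total + result) 0

-- ===== PORT B =====
def sumrangesqr_alt (xmin : Int) (xmax : Int) (base : Int) (added : Int) : Int :=
  let n := xmax - xmin + 1
  if n ≤ 0 then 0
  else
    let geo := if base = 1 then n
      else PySem.Int.floordiv (pyPow base (xmax + 1) - pyPow base xmin) (base - 1)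
    geo + added * n

-- ===== PRECONDITION & SPEC =====
-- Pre_ excludes nonempty ranges starting below 0: there Python's ** on a negative exponent
-- returns a float (not an int) or raises ZeroDivisionError (base = 0).
def Pre_sumrangesqr (xmin : Int) (xmax : Int) (base : Int) (added : Int) : Prop :=
  xmax < xmin ∨ 0 ≤ xmin
instance (xmin : Int) (xmax : Int) (base : Int) (added : Int) : Decidable (Pre_sumrangesqr xmin xmax base added) := by unfold Pre_sumrangesqr; infer_instance
def pvWitness_sumrangesqr : Int × Int × Int × Int := (0, 5, 2, 3)

def Spec_sumrangesqr (xmin : Int) (xmax : Int) (base : Int) (added : Int) (out : Int) : Prop := out = sumrangesqr_alt xmin xmax base added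
instance (xmin : Int) (xmax : Int) (base : Int) (added : Int) (out : Int) : Decidable (Spec_sumrangesqr xmin xmax base added out) := by unfold Spec_sumrangesqr; infer_instance

-- ===== CLAIM (what is proved, stated in full; the proofs are below) =====
def Claim_equal_sumrangesqr : Prop := ∀ (xmin : Int) (xmax : Int) (base : Int) (added : Int), Dom_sumrangesqr xmin xmax base added → Pre_sumrangesqr xmin xmax base added → Spec_sumrangesqr xmin xmax base added (sumrangesqr xmin xmax base added)

-- ===== LEMMAS AND PROOFS =====

-- ===== VERDICT (by name: the statement is the Claim_ definition above) =====
theorem powBin_eq : ∀ (e : Nat) (b : Int), powBin b e = b ^ e := by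
  intro e
  induction e using Nat.strong_induction_on with
  | _ e ih =>
    intro b
    unfold powBin
    by_cases h0 : e = 0
    · simp [h0]
    · rw [dif_neg h0, ih (e / 2) (Nat.div_lt_self (Nat.pos_of_ne_zero h0) one_lt_two)]
      have hsq : (b * b) ^ (e / 2) = b ^ (2 * (e / 2)) := by
        rw [pow_mul, sq]
      by_cases h1 : e % 2 = 1
      · rw [if_pos h1, hsq, ← pow_succ', show 2 * (e / 2) + 1 = e by omega]
      · rw [if_neg h1, hsq, show 2 * (e / 2) = e by omega]

theorem pyPow_eq (b : Int) (e : Int) : pyPow b e = if 0 ≤ e then b ^ e.toNat else 0 := by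
  rw [pyPow, powBin_eq]

-- (base-1) * Σ_{k<m} base^(j+k) telescopes.
theorem geom_mul (b : Int) (j m : Nat) :
    (b - 1) * (∑ k ∈ Finset.range m, b ^ (j + k)) = b ^ (j + m) - b ^ j := by
  induction m with
  | zero => simp
  | succ m ih =>
    rw [Finset.sum_range_succ, mul_add, ih, ← Nat.add_assoc, pow_succ]
    ring

-- A's loop over range(j, j+m) equals the explicit sum.
theorem loop_eq_sum (b add : Int) (j m : Nat) :
    (PySem.List.pyRange (j : Int) ((j : Int) + (m : Int)) 1).foldl
      (fun total x => total + (pyPow b x + add)) 0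
    = (∑ k ∈ Finset.range m, b ^ (j + k)) + add * m := by
  induction m with
  | zero => simp [PySem.List.pyRange_one_eq_nil]
  | succ m ih =>
    have h1 : (j : Int) + ((m : Nat) + 1 : Nat) = ((j : Int) + m) + 1 := by push_cast; ring
    rw [h1, PySem.List.pyRange_one_succ_right (by omega), List.foldl_append, ih]
    have hp : pyPow b ((j : Int) + m) = b ^ (j + m) := by
      simp [pyPow_eq, show (0:Int) ≤ (j:Int) + m by omega,
        show (((j:Int) + m).toNat) = j + m by omega]
    simp only [List.foldl_cons, List.foldl_nil, Finset.sum_range_succ, hp]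
    push_cast
    ring

theorem sumrangesqr_spec : Claim_equal_sumrangesqr := by
  intro xmin xmax base added _ hpre
  unfold Spec_sumrangesqr sumrangesqr sumrangesqr_alt
  simp only []
  by_cases hn : xmax - xmin + 1 ≤ 0
  · -- empty range: both sides are 0
    rw [if_pos hn, PySem.List.pyRange_one_eq_nil (show xmax + 1 ≤ xmin by omega),
      PySem.List.pyRange_one_eq_nil (show xmax - xmin + 1 ≤ (0:Int) by omega)]
    rfl
  · rw [if_neg hn]
    have hx0 : 0 ≤ xmin := by
      rcases hpre with h | h
      · omega
      · exact h
    set j : Nat := xmin.toNat with hj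
    set m : Nat := (xmax - xmin + 1).toNat with hm
    have hjx : (j : Int) = xmin := by omega
    have hmx : (m : Int) = xmax - xmin + 1 := by omega
    -- A's indexed loop, as a direct fold over the list, equals the explicit sum
    have hA : (PySem.List.pyRange 0 (xmax - xmin + 1) 1).foldl
        (fun total x =>
          total + (pyPow base (PySem.List.pyGetD (PySem.List.pyRange xmin (xmax + 1) 1) x 0)
            + added)) 0
        = (∑ k ∈ Finset.range m, base ^ (j + k)) + added * m := by
      have hlen : (xmax - xmin) + 1 = ((PySem.List.pyRange xmin (xmax + 1) 1).length : Int) := by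
        rw [PySem.List.length_pyRange_one]; omega
      rw [hlen, PySem.List.foldl_pyRange_zero_pyGetD' (PySem.List.pyRange xmin (xmax + 1) 1) 0
        (fun total number => total + (pyPow base number + added)) 0]
      have hrange : PySem.List.pyRange xmin (xmax + 1) 1
          = PySem.List.pyRange (j : Int) ((j : Int) + (m : Int)) 1 := by
        rw [hjx, hmx]; congr 1; ring
      rw [hrange, loop_eq_sum base added j m]
    rw [hA]
    by_cases hb : base = 1
    · subst hb
      simp [hmx]
    · rw [if_neg hb]
      have hpmax : pyPow base (xmax + 1) = base ^ (j + m) := by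
        simp [pyPow_eq, show (0:Int) ≤ xmax + 1 by omega, show (xmax + 1).toNat = j + m by omega]
      have hpmin : pyPow base xmin = base ^ j := by
        simp [pyPow_eq, hx0, hj]
      rw [hpmax, hpmin, ← geom_mul base j m, PySem.Int.floordiv,
        Int.mul_fdiv_cancel_left _ (by omega : base - 1 ≠ 0), hmx]
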